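-- pv_equiv track=rewrite | github.com/AI-HR/anget_for_excel_analysis | agents/business_context_agent.py | _parse_llm_dimensions
-- ===== SOURCE A (Python) =====
-- from typing import Dict, Any, List, Tuple
--
-- def _parse_llm_dimensions(text: str) -> List[Dict[str, str]]:
--     """解析LLM生成的分析维度"""
--     dimensions = []
--     lines = text.split("\n")
--     current_dimension = None
--     current_description = []
--
--     for line in lines:
--         line = line.strip()
--         if not line:
--             continue
--
--         # 检查是否是新的维度（通常以数字或破折号开头）
--         if line.startswith(("1.", "2.", "3.", "4.", "5.", "6.", "7.", "- ")) or any(line.startswith(f"{i}." ) for i in range(1, 8)):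
--             # 保存之前的维度
--             if current_dimension and current_description:
--                 dimensions.append({
--                     "name": current_dimension,
--                     "description": "\n".join(current_description)
--                 })
--
--             # 提取新维度名称
--             parts = line.split(":", 1)
--             if len(parts) > 1:
--                 # 移除前缀数字或破折号
--                 name_part = parts[0]
--                 for prefix in ["1.", "2.", "3.", "4.", "5.", "6.", "7.", "- "]:
--                     if name_part.startswith(prefix):
--                         name_part = name_part[len(prefix):].strip()
--                         break
--
--                 current_dimension = name_part
--                 current_description = [parts[1].strip()]
--             else:
--                 current_dimension = line
--                 current_description = []
--         elif current_dimension: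
--             current_description.append(line)
--
--     # 添加最后一个维度
--     if current_dimension and current_description:
--         dimensions.append({
--             "name": current_dimension,
--             "description": "\n".join(current_description)
--         })
--
--     return dimensions
-- ===== SOURCE B (Python) =====
-- def _parse_llm_dimensions(text):
--     """Block-peeling rewrite: normalize lines once, then peel one header-led
--     block per outer iteration (inner scan finds the block's end)."""
--     PREFIXES = ("1.", "2.", "3.", "4.", "5.", "6.", "7.", "- ")
--     lines = [s for s in map(str.strip, text.split("\n")) if s]
--     out = []
--     i = 0
--     while i < len(lines):
--         if not lines[i].startswith(PREFIXES):
--             i += 1            # ignore lines before a header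
--             continue
--         head = lines[i]
--         j = i + 1             # scan to the start of the next block
--         while j < len(lines) and not lines[j].startswith(PREFIXES):
--             j += 1
--         body = lines[i + 1:j]
--         parts = head.split(":", 1)
--         if len(parts) == 2:
--             # every prefix is 2 chars and colon-free, so parts[0] keeps it
--             name, desc = parts[0][2:].strip(), [parts[1].strip()] + body
--         else:
--             name, desc = head, body
--         if name and desc:
--             out.append({"name": name, "description": "\n".join(desc)})
--         i = j
--     return out
-- ===== Notes on version B (the rewrite author's own statement) =====
-- stated objective: alternative
-- what changed: Replaces A's per-line state machine (current name/description buffers with a duplicated save-previous/save-at-end flush) by normalize-then-peel: lines are stripped and filtered once, then an outer loop consumes one whole header-led block per iteration (an inner scan finds the next header), building each emitted dict directly from the header and its body slice; the name drops the fixed 2-char prefix instead of A's prefix-search loop.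
import Mathlib
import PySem

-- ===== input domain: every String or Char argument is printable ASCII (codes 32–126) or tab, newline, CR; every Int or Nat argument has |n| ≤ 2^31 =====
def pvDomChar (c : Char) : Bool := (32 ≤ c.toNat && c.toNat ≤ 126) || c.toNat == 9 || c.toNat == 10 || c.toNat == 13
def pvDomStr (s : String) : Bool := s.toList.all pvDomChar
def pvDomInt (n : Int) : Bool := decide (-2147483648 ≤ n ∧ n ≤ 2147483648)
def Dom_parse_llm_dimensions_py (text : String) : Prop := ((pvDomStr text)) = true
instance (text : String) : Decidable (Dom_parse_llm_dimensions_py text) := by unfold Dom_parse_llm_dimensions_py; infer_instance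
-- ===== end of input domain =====

-- B replaces A's per-line state machine (buffers + duplicated flush) by normalize-then-peel-one-block-per-step; return values proved equal.


-- ===== PORT A =====
def pvPrefixes : List String := ["1.", "2.", "3.", "4.", "5.", "6.", "7.", "- "]

-- A's inner loop: for prefix in [...]: if name_part.startswith(prefix): name_part = name_part[len(prefix):].strip(); break
def pvStripPrefixLoop : List String → String → String
  | [], name => name
  | p :: ps, name =>
    if PySem.Str.startswith name p then PySem.Str.strip (PySem.Str.slice name (some (PySem.Str.len p)) none)
    else pvStripPrefixLoop ps name

-- line.startswith(("1.",…,"7.","- ")) or any(line.startswith(f"{i}.") for i in range(1, 8))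
def pvIsHeaderA (line : String) : Bool :=
  pvPrefixes.any (fun p => PySem.Str.startswith line p)
  || (PySem.List.pyRange 1 8 1).any (fun i => PySem.Str.startswith line (PySem.Int.toStr i ++ "."))

-- A's header branch after the flush: extract the new dimension name and description
def pvAHeader (dims' : List (List (String × String))) (line : String) (parts : List String) :
    List (List (String × String)) × Option String × List String :=
  if parts.length > 1 then
    (dims', some (pvStripPrefixLoop pvPrefixes (parts.getD 0 "")), [PySem.Str.strip (parts.getD 1 "")])
  else (dims', some line, [])

-- A's loop body after 'line = line.strip(); if not line: continue'
-- (Python truthiness of current_dimension: None and "" are falsy — tested as getD "" ≠ "")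
def pvALine (st : List (List (String × String)) × Option String × List String) (line : String) :
    List (List (String × String)) × Option String × List String :=
  if pvIsHeaderA line then
    -- save-previous flush, then parts = line.split(":", 1) (sep ≠ "", never none)
    pvAHeader
      (if st.2.1.getD "" ≠ "" ∧ st.2.2 ≠ [] then
        st.1 ++ [[("name", st.2.1.getD ""), ("description", PySem.Str.join "\n" st.2.2)]]
      else st.1)
      line ((PySem.Str.splitMax? line ":" 1).getD [])
  else if st.2.1.getD "" ≠ "" then (st.1, st.2.1, st.2.2 ++ [line]) else st

-- one iteration of A's for-loop; state = (dimensions, current_dimension, current_description)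
def pvAStep (st : List (List (String × String)) × Option String × List String) (raw : String) :
    List (List (String × String)) × Option String × List String :=
  let line := PySem.Str.strip raw
  if line = "" then st else pvALine st line

def parse_llm_dimensions_py (text : String) : List (List (String × String)) :=
  let lines := (PySem.Str.split? text "\n").getD []   -- sep "\n" ≠ "", never none
  let st := lines.foldl pvAStep ([], none, [])
  if st.2.1.getD "" ≠ "" ∧ st.2.2 ≠ [] then
    st.1 ++ [[("name", st.2.1.getD ""), ("description", PySem.Str.join "\n" st.2.2)]]
  else st.1

-- ===== PORT B =====
def pvIsHeaderB (l : String) : Bool := pvPrefixes.any (fun p => PySem.Str.startswith l p)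

-- B's loop body after the inner scan: build the block's dict(s) from head and body
def pvBlock (head : String) (body : List String) : List (List (String × String)) :=
  let parts := (PySem.Str.splitMax? head ":" 1).getD []
  let nd : String × List String :=
    if parts.length == 2 then
      (PySem.Str.strip (PySem.Str.slice (parts.getD 0 "") (some 2) none),
       PySem.Str.strip (parts.getD 1 "") :: body)
    else (head, body)
  if nd.1 ≠ "" ∧ nd.2 ≠ [] then [[("name", nd.1), ("description", PySem.Str.join "\n" nd.2)]] else []

-- needed by pvParseBlocks's decreasing_by
theorem pvDropWhile_le (p : String → Bool) (ls : List String) : (ls.dropWhile p).length ≤ ls.length :=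
  List.length_dropWhile_le p ls

-- B's outer while-loop over the remainder: skip a non-header line, or peel one block
-- (the inner index scan 'while j < len(lines) and not header' is the takeWhile/dropWhile split)
def pvParseBlocks : List String → List (List (String × String))
  | [] => []
  | l :: ls =>
    if pvIsHeaderB l then
      pvBlock l (ls.takeWhile (fun x => !pvIsHeaderB x))
        ++ pvParseBlocks (ls.dropWhile (fun x => !pvIsHeaderB x))
    else pvParseBlocks ls
termination_by L => L.length
decreasing_by
  · exact Nat.lt_succ_of_le (pvDropWhile_le _ ls)
  · exact Nat.lt_succ_self _

def parse_llm_dimensions_py_alt (text : String) : List (List (String × String)) :=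
  -- lines = [s for s in map(str.strip, text.split("\n")) if s]
  pvParseBlocks ((((PySem.Str.split? text "\n").getD []).map PySem.Str.strip).filter (fun s => s ≠ ""))

-- ===== PRECONDITION & SPEC =====
def Spec_parse_llm_dimensions_py (text : String) (out : List (List (String × String))) : Prop := out = parse_llm_dimensions_py_alt text
instance (text : String) (out : List (List (String × String))) : Decidable (Spec_parse_llm_dimensions_py text out) := by unfold Spec_parse_llm_dimensions_py; infer_instance

-- ===== CLAIM (what is proved, stated in full; the proofs are below) =====
def Claim_equal_parse_llm_dimensions_py : Prop := ∀ (text : String), Dom_parse_llm_dimensions_py text → Spec_parse_llm_dimensions_py text (parse_llm_dimensions_py text)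

-- ===== LEMMAS AND PROOFS =====

-- the emitted entry for a (name, description-lines) pair, with A's/B's common gate
def pvEmitE (name : String) (desc : List String) : List (List (String × String)) :=
  if name ≠ "" ∧ desc ≠ [] then [[("name", name), ("description", PySem.Str.join "\n" desc)]] else []

-- A's duplicated final flush, as a function of the state
def pvFinalize (st : List (List (String × String)) × Option String × List String) :
    List (List (String × String)) :=
  if st.2.1.getD "" ≠ "" ∧ st.2.2 ≠ [] then
    st.1 ++ [[("name", st.2.1.getD ""), ("description", PySem.Str.join "\n" st.2.2)]]
  else st.1

lemma pvFinalize_eq (dims : List (List (String × String))) (nm : Option String) (desc : List String) :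
    pvFinalize (dims, nm, desc) = dims ++ pvEmitE (nm.getD "") desc := by
  unfold pvFinalize pvEmitE
  split_ifs <;> simp

lemma pvIsHeaderA_eq (line : String) :
    pvIsHeaderA line = pvIsHeaderB line := by
  unfold pvIsHeaderA pvIsHeaderB pvPrefixes
  rw [show PySem.List.pyRange 1 8 1 = [1,2,3,4,5,6,7] from by decide]
  simp only [List.any_cons, List.any_nil, Bool.or_false]
  rw [show PySem.Int.toStr 1 ++ "." = "1." from by decide,
      show PySem.Int.toStr 2 ++ "." = "2." from by decide,
      show PySem.Int.toStr 3 ++ "." = "3." from by decide,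
      show PySem.Int.toStr 4 ++ "." = "4." from by decide,
      show PySem.Int.toStr 5 ++ "." = "5." from by decide,
      show PySem.Int.toStr 6 ++ "." = "6." from by decide,
      show PySem.Int.toStr 7 ++ "." = "7." from by decide]
  cases PySem.Str.startswith line "1." <;> cases PySem.Str.startswith line "2." <;>
    cases PySem.Str.startswith line "3." <;> cases PySem.Str.startswith line "4." <;>
    cases PySem.Str.startswith line "5." <;> cases PySem.Str.startswith line "6." <;>
    cases PySem.Str.startswith line "7." <;> simp

lemma pvGoZero (sep : List Char) : ∀ (fuel : Nat) (l cur : List Char) (acc : List (List Char)),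
    PySem.Chars.splitOnMax.go sep fuel 0 l cur acc = ((cur.reverse ++ l) :: acc).reverse := by
  intro fuel l cur acc
  cases fuel with
  | zero => simp [PySem.Chars.splitOnMax.go]
  | succ f => cases l with
    | nil => simp [PySem.Chars.splitOnMax.go]
    | cons c rest => simp [PySem.Chars.splitOnMax.go]

lemma pvGoOne : ∀ (fuel : Nat) (l cur : List Char), l.length < fuel →
    PySem.Chars.splitOnMax.go [':'] fuel 1 l cur [] =
      if ':' ∈ l then [cur.reverse ++ l.takeWhile (· ≠ ':'), (l.dropWhile (· ≠ ':')).tail]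
      else [cur.reverse ++ l] := by
  intro fuel
  induction fuel with
  | zero => intro l cur h; omega
  | succ f ih =>
    intro l cur h
    cases l with
    | nil => simp [PySem.Chars.splitOnMax.go]
    | cons c rest =>
      by_cases hc : c = ':'
      · subst hc
        simp [PySem.Chars.splitOnMax.go, pvGoZero, List.takeWhile, List.dropWhile]
      · have hpre : ([':'] : List Char).isPrefixOf (c :: rest) = false := by
          simp [List.isPrefixOf]; exact fun hh => hc (Eq.symm hh)
        have hlen : rest.length < f := by simpa using h
        rw [show PySem.Chars.splitOnMax.go [':'] (f + 1) 1 (c :: rest) cur [] =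
            PySem.Chars.splitOnMax.go [':'] f 1 rest (c :: cur) [] from by
          simp [PySem.Chars.splitOnMax.go, hpre]]
        rw [ih rest (c :: cur) hlen]
        by_cases hm : ':' ∈ rest
        · simp [hm, hc, List.takeWhile, List.dropWhile]
        · simp [hm, hc, List.takeWhile, List.dropWhile]
          exact fun hh => hc (Eq.symm hh)

lemma pvSplitColon (cs : List Char) :
    PySem.Chars.splitOnMax cs [':'] 1 =
      if ':' ∈ cs then [cs.takeWhile (· ≠ ':'), (cs.dropWhile (· ≠ ':')).tail] else [cs] := by
  unfold PySem.Chars.splitOnMax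
  rw [if_neg (by norm_num)]
  have := pvGoOne (cs.length + 1) cs [] (by omega)
  simpa using this

lemma pvPrefixTakeWhile {p cs : List Char} (h : p <+: cs) (hp : ∀ c ∈ p, c ≠ ':') :
    p <+: cs.takeWhile (· ≠ ':') := by
  induction p generalizing cs with
  | nil => simp
  | cons a as ih =>
    obtain ⟨t, rfl⟩ := h
    have ha : a ≠ ':' := hp a (by simp)
    have htw : ((a :: (as ++ t)).takeWhile (· ≠ ':')) = a :: ((as ++ t).takeWhile (· ≠ ':')) := by
      simp [ha]
    rw [List.cons_append, htw, List.cons_prefix_cons]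
    exact ⟨rfl, ih ⟨t, rfl⟩ fun c hc => hp c (by simp [hc])⟩

lemma pvLoopEq (name : String) (h : pvPrefixes.any (fun p => PySem.Str.startswith name p) = true) :
    pvStripPrefixLoop pvPrefixes name = PySem.Str.strip (PySem.Str.slice name (some 2) none) := by
  unfold pvPrefixes at h ⊢
  simp only [List.any_cons, List.any_nil, Bool.or_false, Bool.or_eq_true] at h
  simp only [pvStripPrefixLoop]
  split_ifs with h1 h2 h3 h4 h5 h6 h7 h8
  · rw [show PySem.Str.len "1." = (2:Int) from by decide]
  · rw [show PySem.Str.len "2." = (2:Int) from by decide]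
  · rw [show PySem.Str.len "3." = (2:Int) from by decide]
  · rw [show PySem.Str.len "4." = (2:Int) from by decide]
  · rw [show PySem.Str.len "5." = (2:Int) from by decide]
  · rw [show PySem.Str.len "6." = (2:Int) from by decide]
  · rw [show PySem.Str.len "7." = (2:Int) from by decide]
  · rw [show PySem.Str.len "- " = (2:Int) from by decide]
  · exfalso
    rcases h with h | h | h | h | h | h | h | h
    exacts [h1 h, h2 h, h3 h, h4 h, h5 h, h6 h, h7 h, h8 h]

-- parts = line.split(":", 1), concretely
lemma pvParts (line : String) :
    (PySem.Str.splitMax? line ":" 1).getD [] =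
      if ':' ∈ line.toList then
        [String.ofList (line.toList.takeWhile (· ≠ ':')),
         String.ofList ((line.toList.dropWhile (· ≠ ':')).tail)]
      else [line] := by
  have : (":" : String).toList = [':'] := by decide
  simp only [PySem.Str.splitMax?, this, PySem.Chars.splitMax?]
  rw [if_neg (by norm_num)]
  rw [pvSplitColon]
  by_cases hc : ':' ∈ line.toList <;> simp [hc]

-- A's prefix-search name extraction agrees with B's drop-2 on the first split piece of a header line
lemma pvNameEq (line : String)
    (hh : pvPrefixes.any (fun p => PySem.Str.startswith line p) = true) :
    pvStripPrefixLoop pvPrefixes (String.ofList (line.toList.takeWhile (· ≠ ':'))) =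
      PySem.Str.strip (PySem.Str.slice (String.ofList (line.toList.takeWhile (· ≠ ':'))) (some 2) none) := by
  apply pvLoopEq
  rw [List.any_eq_true] at hh ⊢
  obtain ⟨p, hp, hsw⟩ := hh
  refine ⟨p, hp, ?_⟩
  have hpre : p.toList <+: line.toList := by
    simpa [PySem.Str.startswith_eq, PySem.Chars.startswith_iff] using hsw
  have hnc : ∀ c ∈ p.toList, c ≠ ':' := by
    simp only [pvPrefixes, List.mem_cons, List.not_mem_nil, or_false] at hp
    rcases hp with rfl | rfl | rfl | rfl | rfl | rfl | rfl | rfl <;>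
      · intro c hcm
        simp only [String.toList] at hcm
        fin_cases hcm <;> decide
  have := pvPrefixTakeWhile hpre hnc
  simpa [PySem.Str.startswith_eq, PySem.Chars.startswith_iff] using this

-- the run of A\'s machine from any state, read off against B\'s block decomposition
lemma pvMain : ∀ (L : List String) (dims : List (List (String × String))) (nm : Option String)
    (desc : List String),
    pvFinalize (L.foldl pvALine (dims, nm, desc)) =
      dims ++ pvEmitE (nm.getD "") (desc ++ L.takeWhile (fun x => !pvIsHeaderB x))
        ++ pvParseBlocks (L.dropWhile (fun x => !pvIsHeaderB x)) := by
  intro L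
  induction L with
  | nil => intro dims nm desc; simp [pvParseBlocks, pvFinalize_eq]
  | cons l ls ih =>
    intro dims nm desc
    rw [List.foldl_cons, List.takeWhile_cons, List.dropWhile_cons]
    by_cases hh : pvIsHeaderB l
    · simp only [hh, Bool.not_true, Bool.false_eq_true, if_false]
      rw [show pvParseBlocks (l :: ls) = pvBlock l (ls.takeWhile (fun x => !pvIsHeaderB x))
            ++ pvParseBlocks (ls.dropWhile (fun x => !pvIsHeaderB x)) from by
        rw [pvParseBlocks, if_pos hh]]
      rw [show pvALine (dims, nm, desc) l =
            pvAHeader (pvFinalize (dims, nm, desc)) l ((PySem.Str.splitMax? l ":" 1).getD []) from by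
        unfold pvALine; rw [pvIsHeaderA_eq, if_pos hh]; rfl]
      unfold pvAHeader pvBlock
      rw [pvParts]
      have hanY : pvPrefixes.any (fun p => PySem.Str.startswith l p) = true := hh
      by_cases hc : ':' ∈ l.toList
      · rw [if_pos hc]
        simp only [List.length_cons, List.length_nil, Nat.reduceAdd,
          gt_iff_lt, Nat.one_lt_ofNat, if_true, List.getD_cons_zero, List.getD_cons_succ]
        rw [if_pos (show ((2:Nat) == 2) = true from rfl)]
        rw [ih]
        rw [pvFinalize_eq, pvNameEq l hanY]
        simp [pvEmitE, List.append_assoc]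
      · rw [if_neg hc]
        simp only [List.length_cons, List.length_nil, Nat.reduceAdd, lt_self_iff_false, if_false]
        rw [if_neg (show ¬((1:Nat) == 2) = true from by decide)]
        rw [ih, pvFinalize_eq]
        simp [pvEmitE, List.append_assoc]
    · simp only [hh, Bool.not_false, if_true]
      by_cases hn : nm.getD "" ≠ ""
      · rw [show pvALine (dims, nm, desc) l = (dims, nm, desc ++ [l]) from by
          unfold pvALine; rw [pvIsHeaderA_eq, if_neg (by simp [hh]), if_pos hn]]
        rw [ih]
        simp [List.append_assoc]
      · rw [show pvALine (dims, nm, desc) l = (dims, nm, desc) from by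
          unfold pvALine; rw [pvIsHeaderA_eq, if_neg (by simp [hh]), if_neg hn]]
        rw [ih]
        rw [not_not] at hn
        simp [pvEmitE, hn]

lemma pvParseBlocks_drop (L : List String) :
    pvParseBlocks (L.dropWhile (fun x => !pvIsHeaderB x)) = pvParseBlocks L := by
  induction L with
  | nil => rfl
  | cons l ls ih =>
    by_cases hh : pvIsHeaderB l
    · simp [hh]
    · rw [List.dropWhile_cons]
      simp only [hh, Bool.not_false, if_true]
      rw [ih, pvParseBlocks, if_neg hh]

lemma pvCleanFold (raws : List String) :
    ∀ st, raws.foldl pvAStep st = ((raws.map PySem.Str.strip).filter (fun s => s ≠ "")).foldl pvALine st := by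
  induction raws with
  | nil => intro st; rfl
  | cons r rs ih =>
    intro st
    by_cases h : PySem.Str.strip r = ""
    · simp [pvAStep, h, ih]
    · simp [pvAStep, h, ih]

-- ===== VERDICT (by name: the statement is the Claim_ definition above) =====
theorem parse_llm_dimensions_py_spec : Claim_equal_parse_llm_dimensions_py := by
  intro text _
  show parse_llm_dimensions_py text = parse_llm_dimensions_py_alt text
  unfold parse_llm_dimensions_py parse_llm_dimensions_py_alt
  rw [show ∀ st : List (List (String × String)) × Option String × List String,
      (if st.2.1.getD "" ≠ "" ∧ st.2.2 ≠ [] then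
        st.1 ++ [[("name", st.2.1.getD ""), ("description", PySem.Str.join "\n" st.2.2)]]
      else st.1) = pvFinalize st from fun _ => rfl]
  rw [pvCleanFold, pvMain, pvParseBlocks_drop]
  simp [pvEmitE]
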